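-- pv_equiv track=rewrite | github.com/HelDoanova/excercise-Python | cv12-erotosthenes-sieve/codes.py | take_repeated_3more_digits
-- ===== SOURCE A (Python) =====
-- def take_repeated_3more_digits(primes_list):
--     """
--     Vyhledá čísla, která obsahují nějakou číslici 3x nebo vícekrát
--     """
--     primes_new = []
--     for prime in primes_list:
--         temp = str(prime)
--         three_digit = False
--         for j in range(0, len(temp)):
--             counter = 0
--             for k in range(0, len(temp)):
--                 if temp[j] == temp[k]:
--                     counter += 1
--                 if counter >= 3:
--                     three_digit = True
--                     break
--         if three_digit:
--             primes_new.append(prime)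
--     return primes_new
-- ===== SOURCE B (Python) =====
-- def take_repeated_3more_digits(primes_list):
--     """
--     Vyhledá čísla, která obsahují nějakou číslici 3x nebo vícekrát
--     """
--     def has_triple(n):
--         counts = {}
--         for ch in str(n):
--             counts[ch] = counts.get(ch, 0) + 1
--         return any(v >= 3 for v in counts.values())
--     return [p for p in primes_list if has_triple(p)]
-- ===== Notes on version B (the rewrite author's own statement) =====
-- stated objective: faster
-- what changed: Replaces A's nested double scan of the digit string (re-counting the whole string for every position, with a break-carrying flag) by one pass per number that builds a char-frequency dict and checks whether any count reaches 3, combined with a list comprehension.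
import Mathlib
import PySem

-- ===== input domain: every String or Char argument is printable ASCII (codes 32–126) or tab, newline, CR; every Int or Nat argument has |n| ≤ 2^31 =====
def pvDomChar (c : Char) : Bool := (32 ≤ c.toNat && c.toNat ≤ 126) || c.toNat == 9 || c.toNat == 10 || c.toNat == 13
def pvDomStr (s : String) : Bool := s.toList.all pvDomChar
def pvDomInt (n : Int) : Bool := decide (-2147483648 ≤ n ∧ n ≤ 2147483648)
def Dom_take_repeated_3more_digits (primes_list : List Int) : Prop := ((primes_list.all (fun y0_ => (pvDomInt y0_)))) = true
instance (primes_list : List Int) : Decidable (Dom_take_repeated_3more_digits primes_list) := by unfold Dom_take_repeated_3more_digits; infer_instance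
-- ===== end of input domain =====

-- B replaces A's nested double scan of the digit string by one counting pass per
-- number (a char-frequency dict) plus an 'any count ≥ 3' check — simpler, one scan
-- instead of a quadratic rescan. Return values are proved equal on all inputs.

-- ===== PORT A =====
-- inner 'for k in range(0, len(temp))' loop of A, with its counter and break
def pvInnerA (c : Char) (ks : List Char) (counter : Int) : Bool :=
  match ks with
  | [] => false
  | k :: rest =>
    let counter := if c == k then counter + 1 else counter
    if 3 ≤ counter then true else pvInnerA c rest counter

-- outer 'for j in range(0, len(temp))' loop of A, carrying the three_digit flag
def pvOuterA (cs all : List Char) (flag : Bool) : Bool :=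
  match cs with
  | [] => flag
  | c :: rest => pvOuterA rest all (if pvInnerA c all 0 then true else flag)

def take_repeated_3more_digits (primes_list : List Int) : List Int :=
  primes_list.foldl (fun primes_new prime =>
    let temp := (PySem.Int.toStr prime).toList
    if pvOuterA temp temp false then primes_new ++ [prime] else primes_new) []

-- ===== PORT B =====
-- B's has_triple: build a char-frequency dict in one pass, then any value ≥ 3
def pvHasTriple (n : Int) : Bool :=
  let counts := (PySem.Int.toStr n).toList.foldl
    (fun d ch => d.insert ch (d.getD ch 0 + 1)) (PySem.Dict.empty : PySem.Dict Char Int)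
  counts.values.any (fun v => 3 ≤ v)

def take_repeated_3more_digits_alt (primes_list : List Int) : List Int :=
  primes_list.filter (fun p => pvHasTriple p)

-- ===== PRECONDITION & SPEC =====
def Spec_take_repeated_3more_digits (primes_list : List Int) (out : List Int) : Prop := out = take_repeated_3more_digits_alt primes_list
instance (primes_list : List Int) (out : List Int) : Decidable (Spec_take_repeated_3more_digits primes_list out) := by unfold Spec_take_repeated_3more_digits; infer_instance

-- ===== CLAIM (what is proved, stated in full; the proofs are below) =====
def Claim_equal_take_repeated_3more_digits : Prop := ∀ (primes_list : List Int), Dom_take_repeated_3more_digits primes_list → Spec_take_repeated_3more_digits primes_list (take_repeated_3more_digits primes_list)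

-- ===== LEMMAS AND PROOFS =====

-- A's inner loop fires exactly when counter plus c's occurrences in ks reaches 3
theorem pvInnerA_true (c : Char) : ∀ (ks : List Char) (counter : Int),
    pvInnerA c ks counter = true ↔ ks ≠ [] ∧ 3 ≤ counter + (ks.count c : Int) := by
  intro ks
  induction ks with
  | nil => intro counter; simp [pvInnerA]
  | cons k rest ih =>
    intro counter
    simp only [pvInnerA, List.count_cons]
    by_cases hck : c = k
    · subst hck
      simp only [BEq.rfl, if_true]
      split_ifs with h3
      · simp only [true_iff]
        exact ⟨List.cons_ne_nil _ _, by push_cast; omega⟩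
      · rw [ih]
        constructor
        · rintro ⟨_, h⟩
          exact ⟨List.cons_ne_nil _ _, by push_cast at h ⊢; omega⟩
        · rintro ⟨_, h⟩
          have hr : rest ≠ [] := by
            rintro rfl
            push_cast at h
            simp at h
            omega
          exact ⟨hr, by push_cast at h ⊢; omega⟩
    · have hb : (c == k) = false := by simp [hck]
      have hb2 : (k == c) = false := by simp [Ne.symm hck]
      simp only [hb, hb2, Bool.false_eq_true, if_false, Nat.add_zero]
      split_ifs with h3
      · simp only [true_iff]
        have h0 : (0 : Int) ≤ rest.count c := Int.natCast_nonneg _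
        exact ⟨List.cons_ne_nil _ _, by omega⟩
      · rw [ih]
        constructor
        · rintro ⟨_, h⟩
          exact ⟨List.cons_ne_nil _ _, h⟩
        · rintro ⟨_, h⟩
          have hr : rest ≠ [] := by
            rintro rfl
            simp at h
            omega
          exact ⟨hr, h⟩

theorem pvOuterA_eq : ∀ (cs all : List Char) (flag : Bool),
    pvOuterA cs all flag = (flag || cs.any (fun c => pvInnerA c all 0)) := by
  intro cs
  induction cs with
  | nil => intro all flag; simp [pvOuterA]
  | cons c rest ih =>
    intro all flag
    simp only [pvOuterA, ih, List.any_cons]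
    cases pvInnerA c all 0 <;> cases flag <;> simp

-- the quadratic flag over any char list agrees with the counter-dict check
theorem pvTriple_eq (t : List Char) :
    (t.any fun c => pvInnerA c t 0)
      = ((t.foldl (fun d ch => d.insert ch (d.getD ch 0 + 1))
          (PySem.Dict.empty : PySem.Dict Char Int)).values.any (fun v => 3 ≤ v)) := by
  rw [PySem.Dict.foldl_insert_getD_add_one_eq_counter, Bool.eq_iff_iff]
  simp only [List.any_eq_true, pvInnerA_true, PySem.Dict.values,
    PySem.Dict.items_counter, List.map_map, List.mem_map, Function.comp,
    PySem.Set.mem_ofList]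
  constructor
  · rintro ⟨c, hc, _, h3⟩
    exact ⟨(t.count c : Int), ⟨c, hc, rfl⟩, by simpa using h3⟩
  · rintro ⟨v, ⟨c, hc, rfl⟩, h3⟩
    exact ⟨c, hc, by rintro rfl; simp at hc, by simpa using h3⟩

-- per-element agreement of A's flag and B's has_triple
theorem pvElem_eq (p : Int) :
    pvOuterA (PySem.Int.toStr p).toList (PySem.Int.toStr p).toList false = pvHasTriple p := by
  rw [pvOuterA_eq, Bool.false_or]
  simp only [pvHasTriple]
  exact pvTriple_eq _

-- ===== VERDICT (by name: the statement is the Claim_ definition above) =====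
theorem take_repeated_3more_digits_spec : Claim_equal_take_repeated_3more_digits := by
  intro primes_list _
  unfold Spec_take_repeated_3more_digits take_repeated_3more_digits take_repeated_3more_digits_alt
  rw [PySem.List.foldl_append_if_eq_filter, List.nil_append]
  exact List.filter_congr (fun p _ => pvElem_eq p)
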